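-- pv_equiv track=rewrite | github.com/nogueirayure001/CS50-Python | plates/plates.py | fist_number_is_zero
-- ===== SOURCE A (Python) =====
-- def fist_number_is_zero(string):
--     for letter in string:
--         if letter.isdigit():
--             if letter == '0':
--                 return True
--             else:
--                 return False
--
--     return False
-- ===== SOURCE B (Python) =====
-- def fist_number_is_zero(string):
--     digits = [c for c in string if c.isdigit()]
--     return bool(digits) and digits[0] == '0'
-- ===== Notes on version B (the rewrite author's own statement) =====
-- stated objective: simpler
-- what changed: Replaces the early-returning character scan with a collect-all-digits comprehension followed by a single inspection of the first collected digit.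
import Mathlib
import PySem

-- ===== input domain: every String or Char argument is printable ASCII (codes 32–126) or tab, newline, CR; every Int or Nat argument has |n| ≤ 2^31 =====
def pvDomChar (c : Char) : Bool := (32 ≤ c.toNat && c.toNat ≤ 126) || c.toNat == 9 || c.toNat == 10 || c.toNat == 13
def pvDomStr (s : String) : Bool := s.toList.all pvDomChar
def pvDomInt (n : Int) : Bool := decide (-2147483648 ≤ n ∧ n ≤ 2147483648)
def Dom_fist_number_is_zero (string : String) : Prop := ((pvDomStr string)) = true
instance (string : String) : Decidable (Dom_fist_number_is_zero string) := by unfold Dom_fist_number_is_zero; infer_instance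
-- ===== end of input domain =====

-- B replaces A's early-returning scan by collecting all digit characters first and inspecting the head: simpler decomposition, same O(n) cost.


-- ===== PORT A =====
-- early-returning scan over the characters
def fistA_loop : List Char → Bool
  | [] => false
  | c :: rest =>
    if PySem.Chars.isdigit c then
      if c = '0' then true else false
    else fistA_loop rest

def fist_number_is_zero (string : String) : Bool := fistA_loop string.toList

-- ===== PORT B =====
-- collect all digits, then inspect the first one
def fist_number_is_zero_alt (string : String) : Bool :=
  let digits := string.toList.filter (fun c => PySem.Chars.isdigit c)
  !digits.isEmpty && digits.headD ' ' = '0'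

-- ===== PRECONDITION & SPEC =====
def Spec_fist_number_is_zero (string : String) (out : Bool) : Prop := out = fist_number_is_zero_alt string
instance (string : String) (out : Bool) : Decidable (Spec_fist_number_is_zero string out) := by unfold Spec_fist_number_is_zero; infer_instance

-- ===== CLAIM (what is proved, stated in full; the proofs are below) =====
def Claim_equal_fist_number_is_zero : Prop := ∀ (string : String), Dom_fist_number_is_zero string → Spec_fist_number_is_zero string (fist_number_is_zero string)

-- ===== LEMMAS AND PROOFS =====
lemma fist_loop_eq (cs : List Char) :
    fistA_loop cs =
      (!(cs.filter (fun c => PySem.Chars.isdigit c)).isEmpty &&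
        (cs.filter (fun c => PySem.Chars.isdigit c)).headD ' ' = '0') := by
  induction cs with
  | nil => simp [fistA_loop]
  | cons c rest ih =>
    by_cases h : PySem.Chars.isdigit c = true
    · unfold fistA_loop
      rw [if_pos h, List.filter_cons_of_pos h]
      by_cases hz : c = '0' <;> simp [hz]
    · unfold fistA_loop
      rw [if_neg h, List.filter_cons_of_neg h]
      exact ih

-- ===== VERDICT (by name: the statement is the Claim_ definition above) =====
theorem fist_number_is_zero_spec : Claim_equal_fist_number_is_zero := by
  intro s _
  unfold Spec_fist_number_is_zero fist_number_is_zero fist_number_is_zero_alt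
  exact fist_loop_eq s.toList
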